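-- pv_equiv track=rewrite | github.com/SNStatComp/AIML4OS_WP11_reconstruction | network_builder/05b_prune_links.py | prune_linkss
-- ===== SOURCE A (Python) =====
-- def prune_linkss(network, degree_constraints):
--     """
--     Prune links from the network based on degree constraints.
--
--     Parameters:
--     - network: A list of edges (tuples) representing the network.
--     - degree_constraints: A dictionary mapping node IDs to their maximum allowed degree.
--
--     Returns:
--     - pruned_network: A list of edges that satisfy the degree constraints.
--     """
--     from collections import defaultdict
--
--     # Count the degree of each node
--     degree_count = defaultdict(int)
--     for edge in network:
--         node_a, node_b = edge
--         degree_count[node_a] += 1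
--         degree_count[node_b] += 1
--
--     # Prune edges that violate degree constraints
--     pruned_network = []
--     for edge in network:
--         node_a, node_b = edge
--         if (degree_count[node_a] <= degree_constraints.get(node_a, float('inf')) and
--             degree_count[node_b] <= degree_constraints.get(node_b, float('inf'))):
--             pruned_network.append(edge)
--
--     return pruned_network
-- ===== SOURCE B (Python) =====
-- def prune_linkss(network, degree_constraints):
--     # Instead of tallying every node's degree up front, scan only the CONSTRAINED
--     # nodes (the dict's keys), computing each one's degree by a direct pass over
--     # the edge list, and collect the over-degree "bad" nodes; an edge survives
--     # iff neither endpoint is bad (unconstrained nodes can never be bad).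
--     def degree(n):
--         return sum((a == n) + (b == n) for a, b in network)
--     bad = {n for n, cap in degree_constraints.items() if degree(n) > cap}
--     return [e for e in network if e[0] not in bad and e[1] not in bad]
-- ===== Notes on version B (the rewrite author's own statement) =====
-- stated objective: alternative
-- what changed: B replaces A's single global degree-counting pass over all edges by per-node degree scans driven by the constraints dict: it iterates only the constrained nodes, scans the edge list once per such node to get its degree, builds the set of over-degree nodes, and keeps the edges with no bad endpoint.
import Mathlib
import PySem

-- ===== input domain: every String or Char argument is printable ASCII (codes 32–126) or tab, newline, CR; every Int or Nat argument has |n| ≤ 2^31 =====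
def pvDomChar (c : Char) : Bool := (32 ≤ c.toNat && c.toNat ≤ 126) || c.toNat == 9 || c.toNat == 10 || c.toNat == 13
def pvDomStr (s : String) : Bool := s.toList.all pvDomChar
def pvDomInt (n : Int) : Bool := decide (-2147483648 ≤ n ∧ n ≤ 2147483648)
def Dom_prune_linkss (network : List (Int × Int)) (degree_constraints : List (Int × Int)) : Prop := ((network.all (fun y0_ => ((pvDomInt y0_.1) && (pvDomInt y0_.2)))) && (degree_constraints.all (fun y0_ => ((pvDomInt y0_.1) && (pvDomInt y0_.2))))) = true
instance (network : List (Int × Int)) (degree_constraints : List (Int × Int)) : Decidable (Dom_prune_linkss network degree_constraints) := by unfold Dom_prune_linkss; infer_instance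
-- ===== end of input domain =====

-- B drops A's global degree tally: it scans only the constrained nodes, computing each
-- one's degree by a direct pass over the edges, and filters edges by the resulting
-- bad-node set; objective: alternative (O(C·E) per-node scans instead of one counter).

-- ===== PORT A =====
def prune_linkss (network : List (Int × Int)) (degree_constraints : List (Int × Int)) : List (Int × Int) :=
  let dc := PySem.Dict.ofList degree_constraints
  -- degree_count = defaultdict(int); for edge: degree_count[a] += 1; degree_count[b] += 1
  let deg := network.foldl
    (fun d e => (d.modify e.1 0 (· + 1)).modify e.2 0 (· + 1)) PySem.Dict.empty
  -- 'deg <= degree_constraints.get(n, float("inf"))': against inf the test is always true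
  network.foldl
    (fun acc e =>
      if ((match dc.get? e.1 with
           | some c => decide (deg.getD e.1 0 ≤ c)
           | none => true) &&
          (match dc.get? e.2 with
           | some c => decide (deg.getD e.2 0 ≤ c)
           | none => true)) = true
      then acc ++ [e] else acc) []

-- ===== PORT B =====
-- degree(n) = sum((a == n) + (b == n) for a, b in network)
def pvDegreeB (network : List (Int × Int)) (n : Int) : Int :=
  (network.map (fun e => (if e.1 = n then (1 : Int) else 0) + (if e.2 = n then 1 else 0))).sum

def prune_linkss_alt (network : List (Int × Int)) (degree_constraints : List (Int × Int)) : List (Int × Int) :=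
  let dc := PySem.Dict.ofList degree_constraints
  let bad : PySem.Set Int := PySem.Set.ofList
    ((dc.items.filter (fun p => decide (pvDegreeB network p.1 > p.2))).map (fun p => p.1))
  network.filter (fun e => !(PySem.Set.contains bad e.1) && !(PySem.Set.contains bad e.2))

-- ===== PRECONDITION & SPEC =====
def Spec_prune_linkss (network : List (Int × Int)) (degree_constraints : List (Int × Int)) (out : List (Int × Int)) : Prop := out = prune_linkss_alt network degree_constraints
instance (network : List (Int × Int)) (degree_constraints : List (Int × Int)) (out : List (Int × Int)) : Decidable (Spec_prune_linkss network degree_constraints out) := by unfold Spec_prune_linkss; infer_instance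

-- ===== CLAIM (what is proved, stated in full; the proofs are below) =====
def Claim_equal_prune_linkss : Prop := ∀ (network : List (Int × Int)) (degree_constraints : List (Int × Int)), Dom_prune_linkss network degree_constraints → Spec_prune_linkss network degree_constraints (prune_linkss network degree_constraints)

-- ===== LEMMAS AND PROOFS =====

-- A's two-modifies-per-edge fold is the counting fold over the flattened endpoint stream
lemma foldl_modify_flatMap (l : List (Int × Int)) (d : PySem.Dict Int Int) :
    (l.flatMap (fun e => [e.1, e.2])).foldl (fun d x => d.modify x 0 (· + 1)) d
      = l.foldl (fun d e => (d.modify e.1 0 (· + 1)).modify e.2 0 (· + 1)) d := by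
  induction l generalizing d with
  | nil => rfl
  | cons e t ih => simp [ih]

-- B's per-node degree scan computes the endpoint count
lemma degreeB_eq_count (l : List (Int × Int)) (n : Int) :
    pvDegreeB l n = ((l.flatMap (fun e => [e.1, e.2])).count n : Int) := by
  induction l with
  | nil => rfl
  | cons e t ih =>
    simp [pvDegreeB, List.count_cons] at *
    rw [ih]
    by_cases h1 : e.1 = n <;> by_cases h2 : e.2 = n <;>
      simp [h1, h2] <;> omega

-- membership in B's bad set is the negation of A's per-endpoint condition
lemma contains_bad_eq (network : List (Int × Int)) (dcl : List (Int × Int)) (n : Int) :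
    PySem.Set.contains
      (PySem.Set.ofList
        ((((PySem.Dict.ofList dcl).items.filter
            (fun p => decide (pvDegreeB network p.1 > p.2))).map (fun p => p.1)))) n
      = !(match (PySem.Dict.ofList dcl).get? n with
          | some c => decide
              (((network.foldl (fun d e => (d.modify e.1 0 (· + 1)).modify e.2 0 (· + 1))
                  PySem.Dict.empty).getD n 0) ≤ c)
          | none => true) := by
  have hdeg : ∀ c : Int,
      ((network.foldl (fun d e => (d.modify e.1 0 (· + 1)).modify e.2 0 (· + 1))
          PySem.Dict.empty).getD n 0) = pvDegreeB network n := by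
    intro _
    rw [← foldl_modify_flatMap, PySem.Dict.getD_foldl_modify_add_one, degreeB_eq_count]
    simp
  have hnd : (PySem.Dict.ofList dcl).keys.Nodup := PySem.Dict.nodup_keys_ofList dcl
  rw [Bool.eq_iff_iff]
  cases h : (PySem.Dict.ofList dcl).get? n with
  | none =>
    have hni : ∀ c : Int, (n, c) ∉ (PySem.Dict.ofList dcl).items := by
      intro c hc
      rw [PySem.Dict.get?_of_mem_items _ hc hnd] at h; cases h
    simp only [PySem.Set.contains, List.contains_eq_mem,
      PySem.Set.mem_ofList, List.mem_map, List.mem_filter, decide_eq_true_eq]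
    constructor
    · rintro ⟨p, ⟨hp, _⟩, rfl⟩; exact absurd hp (hni p.2)
    · intro hfalse; cases hfalse
  | some c =>
    have hmem : (n, c) ∈ (PySem.Dict.ofList dcl).items :=
      PySem.Dict.mem_items_of_get?_eq_some _ h
    rw [hdeg c]
    simp only [PySem.Set.contains, List.contains_eq_mem,
      PySem.Set.mem_ofList, List.mem_map, List.mem_filter, decide_eq_true_eq,
      Bool.not_eq_true', decide_eq_false_iff_not, not_le]
    constructor
    · rintro ⟨p, ⟨hp, hgt⟩, rfl⟩
      have hpc : (PySem.Dict.ofList dcl).get? p.1 = some p.2 :=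
        PySem.Dict.get?_of_mem_items _ hp hnd
      rw [h] at hpc
      cases hpc; exact hgt
    · intro hgt
      exact ⟨(n, c), ⟨hmem, hgt⟩, rfl⟩

-- ===== VERDICT (by name: the statement is the Claim_ definition above) =====
theorem prune_linkss_spec : Claim_equal_prune_linkss := by
  intro network degree_constraints _
  unfold Spec_prune_linkss prune_linkss prune_linkss_alt
  rw [PySem.List.foldl_append_ite_eq_filter]
  simp only [List.nil_append]
  apply List.filter_congr
  intro e he
  rw [contains_bad_eq network degree_constraints e.1, contains_bad_eq network degree_constraints e.2]
  simp
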